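-- pv_equiv track=rewrite | github.com/Gorane7/aoc_2021 | day19.py | generate_relative_locs
-- ===== SOURCE A (Python) =====
-- def generate_relative_locs(amount):
--     matrix = []
--     for i in range(amount):
--         row = []
--         for j in range(amount):
--             if i == j:
--                 row.append((0, 0, 0, 0))
--             else:
--                 row.append(None)
--         matrix.append(row)
--     return matrix
-- ===== SOURCE B (Python) =====
-- def generate_relative_locs(amount):
--     # Start from a template row with the diagonal marker in the first cell and
--     # rotate it right by one for each successive row: rotation moves the
--     # marker from index i to index i+1, which is exactly the diagonal.
--     row = [(0, 0, 0, 0)] + [None] * (amount - 1)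
--     matrix = []
--     for _ in range(amount):
--         matrix.append(row)
--         row = row[-1:] + row[:-1]
--     return matrix
-- ===== Notes on version B (the rewrite author's own statement) =====
-- stated objective: alternative
-- what changed: B builds a single template row with the marker in the first cell and derives every subsequent row by rotating the previous row right by one (row[-1:]+row[:-1]), instead of deciding each cell with a nested-loop i==j comparison.
import Mathlib
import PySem

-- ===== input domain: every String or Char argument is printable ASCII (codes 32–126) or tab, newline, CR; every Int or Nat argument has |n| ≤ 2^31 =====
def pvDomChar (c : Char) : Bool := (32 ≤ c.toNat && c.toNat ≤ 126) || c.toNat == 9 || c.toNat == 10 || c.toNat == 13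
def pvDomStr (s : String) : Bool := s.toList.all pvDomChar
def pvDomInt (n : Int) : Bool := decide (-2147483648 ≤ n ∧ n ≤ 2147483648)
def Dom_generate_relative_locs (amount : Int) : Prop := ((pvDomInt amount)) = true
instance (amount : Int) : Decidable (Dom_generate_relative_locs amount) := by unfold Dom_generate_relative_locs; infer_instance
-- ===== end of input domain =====

-- B rotates a single template row (marker in the first cell) right by one per row instead of a nested loop with a per-cell i==j test; same values, different algorithm.
-- ===== PORT A =====
def generate_relative_locs (amount : Int) : List (List (Option (Int × Int × Int × Int))) :=
  (PySem.List.pyRange 0 amount 1).foldl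
    (fun matrix i =>
      matrix ++ [(PySem.List.pyRange 0 amount 1).foldl
        (fun row j => row ++ [if i == j then some (0, 0, 0, 0) else none]) []])
    []

-- ===== PORT B =====
-- row[-1:] ++ row[:-1]: exact for every list, including the zero-length row.
def pvRotRight (r : List (Option (Int × Int × Int × Int))) : List (Option (Int × Int × Int × Int)) :=
  r.drop (r.length - 1) ++ r.take (r.length - 1)

def generate_relative_locs_alt (amount : Int) : List (List (Option (Int × Int × Int × Int))) :=
  let base := [some ((0:Int), (0:Int), (0:Int), (0:Int))] ++ List.replicate (amount - 1).toNat none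
  ((PySem.List.pyRange 0 amount 1).foldl
    (fun (st : List (List (Option (Int × Int × Int × Int))) × List (Option (Int × Int × Int × Int))) _ =>
      (st.1 ++ [st.2], pvRotRight st.2))
    ([], base)).1

-- ===== PRECONDITION & SPEC =====
def Spec_generate_relative_locs (amount : Int) (out : List (List (Option (Int × Int × Int × Int)))) : Prop := out = generate_relative_locs_alt amount
instance (amount : Int) (out : List (List (Option (Int × Int × Int × Int)))) : Decidable (Spec_generate_relative_locs amount out) := by unfold Spec_generate_relative_locs; infer_instance

-- ===== CLAIM (what is proved, stated in full; the proofs are below) =====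
def Claim_equal_generate_relative_locs : Prop := ∀ (amount : Int), Dom_generate_relative_locs amount → Spec_generate_relative_locs amount (generate_relative_locs amount)

-- ===== LEMMAS AND PROOFS =====

-- the canonical row: marker at index k, n cells total (k < n)
def pvRowN (n k : Nat) : List (Option (Int × Int × Int × Int)) :=
  List.replicate k none ++ [some (0, 0, 0, 0)] ++ List.replicate (n - 1 - k) none

-- rotating a list ending in x moves x to the front
theorem pv_rot_snoc (xs : List (Option (Int × Int × Int × Int))) (x : Option (Int × Int × Int × Int)) :
    pvRotRight (xs ++ [x]) = x :: xs := by
  unfold pvRotRight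
  simp

theorem pv_rot_row (n k : Nat) (h : k + 1 < n) : pvRotRight (pvRowN n k) = pvRowN n (k + 1) := by
  have h1 : n - 1 - k = (n - 2 - k) + 1 := by omega
  have h2 : n - 1 - (k + 1) = n - 2 - k := by omega
  unfold pvRowN
  rw [h1, h2, List.replicate_succ', ← List.append_assoc, pv_rot_snoc]
  simp [List.replicate_succ]

theorem pv_iter_row (n k : Nat) (hk : k < n) :
    pvRotRight^[k] (pvRowN n 0) = pvRowN n k := by
  induction k with
  | zero => simp
  | succ m ih =>
    rw [Function.iterate_succ_apply', ih (by omega), pv_rot_row n m (by omega)]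

-- the rotation loop produces the iterates of pvRotRight
theorem pv_foldl_rot {α : Type} (f : List α → List α) (l : List Int) (acc : List (List α)) (r : List α) :
    (l.foldl (fun (st : List (List α) × List α) _ => (st.1 ++ [st.2], f st.2)) (acc, r)).1
      = acc ++ (List.range l.length).map (fun k => f^[k] r) := by
  induction l generalizing acc r with
  | nil => simp
  | cons a t ih =>
    rw [List.foldl_cons, ih, List.length_cons, List.range_succ_eq_map]
    simp [Function.iterate_succ_apply, List.map_map, Function.comp_def]

-- a diagonal marker past the range is all-none
theorem pv_row_allnone (n : Nat) (d : Option (Int × Int × Int × Int)) :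
    (List.range n).map (fun j => if n = j then d else none) = List.replicate n none := by
  rw [List.eq_replicate_iff]
  constructor
  · simp
  · intro b hb
    simp only [List.mem_map, List.mem_range] at hb
    obtain ⟨j, hj, hb⟩ := hb
    rw [if_neg (by omega)] at hb
    exact hb.symm

-- characterisation of one A-row over Nat indices
theorem pv_row_eq (n k : Nat) (hk : k < n) :
    (List.range n).map (fun j => if k = j then some ((0:Int), (0:Int), (0:Int), (0:Int)) else none)
      = pvRowN n k := by
  unfold pvRowN
  induction n with
  | zero => omega
  | succ m ih =>
    rw [List.range_succ, List.map_append]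
    by_cases hkm : k < m
    · rw [ih hkm]
      simp only [List.map_cons, List.map_nil, if_neg (by omega : ¬ k = m)]
      have h1 : m - 1 - k + 1 = m + 1 - 1 - k := by omega
      simp [List.append_assoc, ← List.replicate_succ', h1]
    · have hkm' : k = m := by omega
      subst hkm'
      rw [pv_row_allnone]
      simp

-- A equals the canonical row matrix
theorem pv_A_eq (amount : Int) :
    generate_relative_locs amount = (List.range amount.toNat).map (fun k => pvRowN amount.toNat k) := by
  unfold generate_relative_locs
  rw [PySem.List.foldl_append_singleton_eq_map, List.nil_append]
  rw [PySem.List.pyRange_one]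
  simp only [Int.sub_zero, List.map_map]
  apply List.map_congr_left
  intro k hk
  rw [List.mem_range] at hk
  simp only [Function.comp_def]
  rw [PySem.List.foldl_append_singleton_eq_map, List.nil_append, List.map_map]
  have hfun : ((fun j => if ((0:Int) + k) == j then some ((0:Int), (0:Int), (0:Int), (0:Int)) else none) ∘ fun m : Nat => (0:Int) + m)
      = fun m : Nat => if k = m then some ((0:Int), (0:Int), (0:Int), (0:Int)) else none := by
    funext m
    simp only [Function.comp, beq_iff_eq]
    congr 1
    simp only [eq_iff_iff]
    omega
  rw [hfun, pv_row_eq amount.toNat k hk]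

-- ===== VERDICT (by name: the statement is the Claim_ definition above) =====
theorem generate_relative_locs_spec : Claim_equal_generate_relative_locs := by
  intro amount _
  unfold Spec_generate_relative_locs generate_relative_locs_alt
  rw [pv_A_eq, pv_foldl_rot, List.nil_append, PySem.List.pyRange_one]
  simp only [Int.sub_zero, List.length_map, List.length_range]
  apply List.map_congr_left
  intro k hk
  rw [List.mem_range] at hk
  have hbase : [some ((0:Int), (0:Int), (0:Int), (0:Int))] ++ List.replicate (amount - 1).toNat none
      = pvRowN amount.toNat 0 := by
    unfold pvRowN
    congr 2
    omega
  rw [hbase, pv_iter_row amount.toNat k hk]
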